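-- pv_equiv track=rewrite | github.com/alexferrelopez/AdventOfCode_2025 | ex3.py | find_max_value_in_str
-- ===== SOURCE A (Python) =====
-- def find_max(arr):
--     position = 0
--     max_value = arr[position]
--     for i, num in enumerate(arr):
--         if num > max_value:
--             max_value = num
--             position = i
--
--     return max_value, position
--
-- def find_max_value_in_str(arr, depth=12):
--     if depth == 1:
--         max_val, pos = find_max(arr)
--         return str(max_val)
--     else:
--         sliced_arr = arr[:-(depth-1)]
--
--         max_val, pos = find_max(sliced_arr)
--
--         new_arr = arr[pos + 1:]
--         res = str(max_val) + find_max_value_in_str(new_arr, depth - 1)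
--         return res
-- ===== SOURCE B (Python) =====
-- def find_max_value_in_str(arr, depth=12):
--     # Monotonic stack: single pass building the lexicographically greatest
--     # length-`depth` subsequence of arr (as a value sequence), then join.
--     if depth < 1 or depth > len(arr):
--         raise IndexError("need 1 <= depth <= len(arr)")
--     stack = []
--     rem = len(arr)  # elements not yet consumed, including the current one
--     for num in arr:
--         while stack and stack[-1] < num and len(stack) + rem > depth:
--             stack.pop()
--         stack.append(num)
--         rem -= 1
--     return ''.join(str(v) for v in stack[:depth])
-- ===== Notes on version B (the rewrite author's own statement) =====
-- stated objective: faster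
-- what changed: A repeatedly rescans and reslices the list (one find_max pass plus two list copies per output digit) to build the greedy maximal subsequence; B builds the same lexicographically greatest length-depth subsequence in a single left-to-right pass with a monotonic stack and joins it once.
import Mathlib
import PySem

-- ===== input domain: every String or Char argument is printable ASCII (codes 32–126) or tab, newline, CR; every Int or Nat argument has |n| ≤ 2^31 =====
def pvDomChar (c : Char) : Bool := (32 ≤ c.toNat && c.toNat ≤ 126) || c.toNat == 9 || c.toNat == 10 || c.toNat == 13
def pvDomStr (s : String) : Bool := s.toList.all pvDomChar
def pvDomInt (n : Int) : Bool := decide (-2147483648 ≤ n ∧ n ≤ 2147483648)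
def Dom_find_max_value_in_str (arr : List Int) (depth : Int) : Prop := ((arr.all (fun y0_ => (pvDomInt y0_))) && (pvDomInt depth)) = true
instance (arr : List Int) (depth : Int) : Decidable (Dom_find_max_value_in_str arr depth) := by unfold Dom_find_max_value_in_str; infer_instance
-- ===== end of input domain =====

-- B replaces A's depth-many scan-and-slice passes by a single monotonic-stack pass (objective: faster, one pass instead of depth passes).

-- ===== PORT A =====
-- the 'for i, num in enumerate(arr)' loop of find_max: counter i, accumulator (max_value, position)
def findMaxLoop : List Int → Int → Int × Int → Int × Int
  | [], _, acc => acc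
  | num :: rest, i, acc =>
      findMaxLoop rest (i + 1) (if num > acc.1 then (num, i) else acc)

-- arr[0] raises IndexError on []; total form with .getD, excluded by Pre_
def find_max (arr : List Int) : Int × Int :=
  findMaxLoop arr 0 ((PySem.List.pyGet? arr 0).getD 0, 0)

-- recursion on depth, run with fuel = depth.toNat (for depth ≤ 0 the Python recurses forever; excluded by Pre_)
def find_max_value_in_str_go : Nat → List Int → Int → String
  | 0, _, _ => ""
  | fuel+1, arr, depth =>
    if depth = 1 then PySem.Int.toStr (find_max arr).1
    else
      let sliced := PySem.List.slice arr none (some (-(depth - 1)))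
      let mp := find_max sliced
      let new_arr := PySem.List.slice arr (some (mp.2 + 1)) none
      PySem.Int.toStr mp.1 ++ find_max_value_in_str_go fuel new_arr (depth - 1)

def find_max_value_in_str (arr : List Int) (depth : Int) : String :=
  find_max_value_in_str_go depth.toNat arr depth

-- ===== PORT B =====
-- the stack is stored top-first (stack[-1] = head, append = cons, pop = tail); the final Python stack is its reverse
-- the inner 'while stack and stack[-1] < num and len(stack) + rem > depth: stack.pop()' loop
def altPop (num rem depth : Int) : List Int → List Int
  | [] => []
  | top :: r =>
      if top < num ∧ ((r.length : Int) + 1) + rem > depth then altPop num rem depth r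
      else top :: r

-- the 'for num in arr' loop; rem = number of elements not yet consumed, including num
def altLoop (depth : Int) : List Int → Int → List Int → List Int
  | [], _, stack => stack
  | num :: xs, rem, stack => altLoop depth xs (rem - 1) (num :: altPop num rem depth stack)

-- B validates its input and raises IndexError otherwise; the port returns "" there (excluded by Pre_)
def find_max_value_in_str_alt (arr : List Int) (depth : Int) : String :=
  if depth < 1 ∨ (arr.length : Int) < depth then ""
  else
    let stack := (altLoop depth arr (arr.length : Int) []).reverse
    PySem.Str.join "" ((PySem.List.slice stack none (some depth)).map PySem.Int.toStr)

-- ===== PRECONDITION & SPEC =====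
-- Pre_ excludes exactly the inputs where A raises: depth ≤ 0 → unbounded recursion (RecursionError),
-- arr.length < depth → find_max hits an empty slice (IndexError). A returns normally everywhere else.
def Pre_find_max_value_in_str (arr : List Int) (depth : Int) : Prop :=
  1 ≤ depth ∧ depth ≤ (arr.length : Int)
instance (arr : List Int) (depth : Int) : Decidable (Pre_find_max_value_in_str arr depth) := by
  unfold Pre_find_max_value_in_str; infer_instance

def pvWitness_find_max_value_in_str : List Int × Int := ([3, 1, 4, 1, 5], 3)

def Spec_find_max_value_in_str (arr : List Int) (depth : Int) (out : String) : Prop := out = find_max_value_in_str_alt arr depth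
instance (arr : List Int) (depth : Int) (out : String) : Decidable (Spec_find_max_value_in_str arr depth out) := by unfold Spec_find_max_value_in_str; infer_instance

-- ===== CLAIM (what is proved, stated in full; the proofs are below) =====
def Claim_equal_find_max_value_in_str : Prop := ∀ (arr : List Int) (depth : Int), Dom_find_max_value_in_str arr depth → Pre_find_max_value_in_str arr depth → Spec_find_max_value_in_str arr depth (find_max_value_in_str arr depth)

-- ===== LEMMAS AND PROOFS =====

-- greedy value sequence computed by A, on plain lists (proof-only reference)
def G : Nat → List Int → List Int
  | 0, _ => []
  | k+1, xs =>
      let mp := find_max (xs.take (xs.length - k))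
      mp.1 :: G k (xs.drop (mp.2.toNat + 1))

-- find_max's loop either keeps the accumulator (nothing bigger) or returns the first maximum
lemma fml_cases (rest : List Int) : ∀ (i mv pos : Int),
    (findMaxLoop rest i (mv, pos) = (mv, pos) ∧ ∀ x ∈ rest, x ≤ mv)
    ∨ (∃ jn : Nat, ∃ hjn : jn < rest.length,
        findMaxLoop rest i (mv, pos) = (rest[jn], i + (jn : Int)) ∧
        mv < rest[jn] ∧
        (∀ k (hk : k < jn), rest[k]'(by omega) < rest[jn]) ∧
        (∀ k (hk : k < rest.length), rest[k] ≤ rest[jn])) := by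
  induction rest with
  | nil => intro i mv pos; left; simp [findMaxLoop]
  | cons num rest ih =>
    intro i mv pos
    by_cases hgt : num > mv
    · simp only [findMaxLoop, if_pos hgt]
      rcases ih (i + 1) num i with ⟨heq, hle⟩ | ⟨jn, hjn, heq, hlt, hbef, hall⟩
      · right
        refine ⟨0, by simp, ?_, by simpa using hgt, ?_, ?_⟩
        · simpa using heq
        · intro k hk; omega
        · intro k hk
          cases k with
          | zero => simp
          | succ k' => simpa using hle _ (by simp)
      · right
        refine ⟨jn + 1, by simpa using hjn, ?_, ?_, ?_, ?_⟩
        · simp only [List.getElem_cons_succ]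
          rw [heq]; congr 1; push_cast; ring
        · exact lt_trans hgt hlt
        · intro k hk
          cases k with
          | zero => simpa using hlt
          | succ k' => simpa using hbef k' (by omega)
        · intro k hk
          cases k with
          | zero => simpa using le_of_lt hlt
          | succ k' => simpa using hall k' (by simpa using hk)
    · simp only [findMaxLoop, if_neg hgt]
      rcases ih (i + 1) mv pos with ⟨heq, hle⟩ | ⟨jn, hjn, heq, hlt, hbef, hall⟩
      · left
        refine ⟨heq, ?_⟩
        intro x hx
        rcases List.mem_cons.mp hx with h | h
        · omega
        · exact hle x h
      · right
        refine ⟨jn + 1, by simpa using hjn, ?_, hlt, ?_, ?_⟩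
        · simp only [List.getElem_cons_succ]
          rw [heq]; congr 1; push_cast; ring
        · intro k hk
          cases k with
          | zero => simp only [List.getElem_cons_zero, List.getElem_cons_succ]; omega
          | succ k' => simpa using hbef k' (by omega)
        · intro k hk
          cases k with
          | zero => simp only [List.getElem_cons_zero, List.getElem_cons_succ]; omega
          | succ k' => simpa using hall k' (by simpa using hk)

-- find_max on a nonempty list: value = max, position = its first index (strictly larger than everything before)
lemma find_max_spec (xs : List Int) (hne : xs ≠ []) :
    ∃ pn : Nat, ∃ hp : pn < xs.length,
      find_max xs = (xs[pn], (pn : Int)) ∧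
      (∀ k (hk : k < pn), xs[k]'(by omega) < xs[pn]) ∧
      (∀ k (hk : k < xs.length), xs[k] ≤ xs[pn]) := by
  obtain ⟨a, t, rfl⟩ := List.exists_cons_of_ne_nil hne
  have h0 : find_max (a :: t) = findMaxLoop t 1 (a, 0) := by
    simp [find_max, findMaxLoop]
  rcases fml_cases t 1 a 0 with ⟨heq, hle⟩ | ⟨jn, hjn, heq, hlt, hbef, hall⟩
  · refine ⟨0, by simp, ?_, ?_, ?_⟩
    · rw [h0, heq]; simp
    · intro k hk; omega
    · intro k hk
      cases k with
      | zero => simp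
      | succ k' => simpa using hle _ (by simp)
  · refine ⟨jn + 1, by simpa using hjn, ?_, ?_, ?_⟩
    · rw [h0, heq]
      simp only [List.getElem_cons_succ]
      congr 1; push_cast; ring
    · intro k hk
      cases k with
      | zero => simpa using hlt
      | succ k' => simpa using hbef k' (by omega)
    · intro k hk
      cases k with
      | zero => simpa using le_of_lt hlt
      | succ k' => simpa using hall k' (by simpa using hk)

lemma altPop_subset (num rem depth : Int) : ∀ st, ∀ x ∈ altPop num rem depth st, x ∈ st := by
  intro st
  induction st with
  | nil => simp [altPop]
  | cons top r ih =>
    intro x hx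
    unfold altPop at hx
    split at hx
    · exact List.mem_cons_of_mem _ (ih x hx)
    · exact hx

lemma altPop_all (num rem depth : Int) : ∀ st, (∀ t ∈ st, t < num) → depth ≤ rem →
    altPop num rem depth st = [] := by
  intro st
  induction st with
  | nil => intro _ _; rfl
  | cons top r ih =>
    intro hlt hd
    unfold altPop
    rw [if_pos ⟨hlt top (List.mem_cons_self), by omega⟩]
    exact ih (fun t ht => hlt t (List.mem_cons_of_mem _ ht)) hd

lemma altPop_protected (num rem depth m : Int) (hm : m < num → rem < depth) :
    ∀ st, altPop num rem depth (st ++ [m]) = altPop num rem (depth - 1) st ++ [m] := by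
  intro st
  induction st with
  | nil =>
    simp only [List.nil_append, altPop]
    rw [if_neg]
    simp only [List.length_nil]
    intro ⟨h1, h2⟩
    have := hm h1; omega
  | cons top r ih =>
    simp only [List.cons_append, altPop, List.length_append, List.length_cons, List.length_nil]
    by_cases hc : top < num ∧ ((r.length : Int) + 1) + rem > depth - 1
    · rw [if_pos (by push_cast; omega), if_pos hc]; exact ih
    · rw [if_neg (by push_cast; omega), if_neg hc]; rfl

lemma altLoop_append (depth : Int) (as bs : List Int) : ∀ (rem : Int) st,
    altLoop depth (as ++ bs) rem st = altLoop depth bs (rem - as.length) (altLoop depth as rem st) := by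
  induction as with
  | nil => intro rem st; simp [altLoop]
  | cons num as ih =>
    intro rem st
    simp only [List.cons_append, altLoop, ih]
    congr 1
    simp only [List.length_cons]
    push_cast
    ring

lemma altLoop_subset (depth : Int) : ∀ as (rem : Int) st x, x ∈ altLoop depth as rem st → x ∈ as ∨ x ∈ st := by
  intro as
  induction as with
  | nil => intro rem st x hx; exact Or.inr hx
  | cons num as ih =>
    intro rem st x hx
    rcases ih (rem - 1) _ x hx with h | h
    · exact Or.inl (List.mem_cons_of_mem _ h)
    · rcases List.mem_cons.mp h with h | h
      · exact Or.inl (h ▸ List.mem_cons_self)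
      · exact Or.inr (altPop_subset _ _ _ _ x h)

-- a bottom element never popped (anything bigger arrives only when the budget forbids popping it) rides along
lemma altLoop_protected (depth m : Int) : ∀ (as : List Int) (rem : Int) st,
    (∀ k (hk : k < as.length), m < as[k] → rem - k < depth) →
    altLoop depth as rem (st ++ [m]) = altLoop (depth - 1) as rem st ++ [m] := by
  intro as
  induction as with
  | nil => intro rem st _; rfl
  | cons num as ih =>
    intro rem st h
    simp only [altLoop]
    rw [altPop_protected num rem depth m (fun hlt => by have := h 0 (by simp) (by simpa using hlt); omega : m < num → rem < depth) st]
    rw [show num :: (altPop num rem (depth - 1) st ++ [m]) = (num :: altPop num rem (depth - 1) st) ++ [m] from rfl]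
    exact ih (rem - 1) _ (fun k hk hlt => by
      have := h (k + 1) (by simpa using hk) (by simpa using hlt)
      push_cast at this ⊢; omega)

-- the monotonic stack, truncated to k, is exactly A's greedy sequence
lemma stack_eq_G : ∀ (k : Nat) (xs : List Int), k ≤ xs.length →
    ((altLoop (k : Int) xs (xs.length : Int) []).reverse.take k) = G k xs := by
  intro k
  induction k with
  | zero => intro xs _; simp [G]
  | succ k ih =>
    intro xs hk
    have hwlen : (xs.take (xs.length - k)).length = xs.length - k := by
      simp [List.length_take]
    have hwne : xs.take (xs.length - k) ≠ [] := by
      intro h; rw [h] at hwlen; simp at hwlen; omega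
    obtain ⟨pn, hp, hfm, hbef, hall⟩ := find_max_spec (xs.take (xs.length - k)) hwne
    rw [hwlen] at hp
    simp only [List.getElem_take] at hfm hbef hall
    have hpn_lt : pn < xs.length := by omega
    have hysl : (xs.drop (pn + 1)).length = xs.length - (pn + 1) := List.length_drop
    have hkys : k ≤ (xs.drop (pn + 1)).length := by omega
    have htpl : ((xs.take pn).length : Int) = (pn : Int) := by
      simp only [List.length_take]; push_cast; omega
    have hst0 : ∀ t ∈ altLoop ((k+1 : Nat) : Int) (xs.take pn) (xs.length : Int) [], t < xs[pn] := by
      intro t ht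
      rcases altLoop_subset _ _ _ _ t ht with h | h
      · rcases List.mem_take_iff_getElem.mp h with ⟨j, hj, rfl⟩
        exact hbef j (by omega)
      · simp at h
    have hxs : xs.take pn ++ (xs[pn] :: xs.drop (pn + 1)) = xs := by
      rw [← List.drop_eq_getElem_cons hpn_lt, List.take_append_drop]
    have hpop : altPop xs[pn] ((xs.length : Int) - (xs.take pn).length) ((k+1 : Nat) : Int)
        (altLoop ((k+1 : Nat) : Int) (xs.take pn) (xs.length : Int) []) = [] := by
      rw [htpl]
      exact altPop_all _ _ _ _ hst0 (by push_cast; omega)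
    have key : altLoop ((k+1 : Nat) : Int) xs (xs.length : Int) []
        = altLoop (k : Int) (xs.drop (pn + 1)) (((xs.drop (pn+1)).length : Nat) : Int) [] ++ [xs[pn]] := by
      calc altLoop ((k+1 : Nat) : Int) xs (xs.length : Int) []
          = altLoop ((k+1 : Nat) : Int) (xs.take pn ++ (xs[pn] :: xs.drop (pn + 1))) (xs.length : Int) [] := by
            rw [hxs]
        _ = altLoop ((k+1 : Nat) : Int) (xs[pn] :: xs.drop (pn + 1)) ((xs.length : Int) - (xs.take pn).length)
              (altLoop ((k+1 : Nat) : Int) (xs.take pn) (xs.length : Int) []) := by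
            rw [altLoop_append]
        _ = altLoop ((k+1 : Nat) : Int) (xs.drop (pn + 1)) ((xs.length : Int) - (xs.take pn).length - 1)
              ([] ++ [xs[pn]]) := by
            simp only [altLoop, hpop, List.nil_append]
        _ = altLoop (((k+1 : Nat) : Int) - 1) (xs.drop (pn + 1)) ((xs.length : Int) - (xs.take pn).length - 1) [] ++ [xs[pn]] := by
            apply altLoop_protected
            intro j hj hlt
            rw [List.getElem_drop] at hlt
            by_cases hin : pn + 1 + j < xs.length - k
            · have := hall (pn + 1 + j) (by rw [hwlen]; omega)
              omega
            · rw [htpl]; push_cast; omega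
        _ = altLoop (k : Int) (xs.drop (pn + 1)) (((xs.drop (pn+1)).length : Nat) : Int) [] ++ [xs[pn]] := by
            rw [htpl, show ((k+1 : Nat) : Int) - 1 = (k : Int) by push_cast; ring,
              show (xs.length : Int) - (pn : Int) - 1 = (((xs.drop (pn+1)).length : Nat) : Int) by
                rw [hysl]; omega]
    rw [key, List.reverse_append]
    simp only [List.reverse_cons, List.reverse_nil, List.nil_append, List.singleton_append,
      List.take_succ_cons]
    rw [ih _ hkys]
    simp only [G, hfm, Int.toNat_natCast]

lemma join_empty_cons (a : String) (l : List String) :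
    PySem.Str.join "" (a :: l) = a ++ PySem.Str.join "" l := by
  apply String.toList_inj.mp
  cases l with
  | nil => simp [PySem.Str.toList_join, PySem.Chars.join_singleton, PySem.Chars.join_nil]
  | cons b l => simp [PySem.Str.toList_join, PySem.Chars.join_cons_cons]

-- A's port computes the join of the greedy sequence
lemma A_eq_G : ∀ (k : Nat) (xs : List Int), 1 ≤ k → (k : Int) ≤ (xs.length : Int) →
    find_max_value_in_str_go k xs (k : Int) = PySem.Str.join "" ((G k xs).map PySem.Int.toStr) := by
  intro k
  induction k with
  | zero => intro xs h1 _; omega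
  | succ k ih =>
    intro xs _ h2
    have hn : k + 1 ≤ xs.length := by exact_mod_cast h2
    by_cases hk0 : k = 0
    · subst hk0
      show find_max_value_in_str_go 1 xs 1 = _
      simp only [find_max_value_in_str_go]
      have : G 1 xs = [(find_max xs).1] := by
        simp [G, List.take_length]
      rw [this]
      apply String.toList_inj.mp
      simp [PySem.Str.toList_join, PySem.Chars.join_singleton]
    · have hwlen : (xs.take (xs.length - k)).length = xs.length - k := by
        simp [List.length_take]
      have hwne : xs.take (xs.length - k) ≠ [] := by
        intro h; rw [h] at hwlen; simp at hwlen; omega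
      obtain ⟨pn, hp, hfm, hbef, hall⟩ := find_max_spec (xs.take (xs.length - k)) hwne
      rw [hwlen] at hp
      have hys : (k : Int) ≤ ((xs.drop (pn + 1)).length : Int) := by
        have : (xs.drop (pn + 1)).length = xs.length - (pn + 1) := List.length_drop
        push_cast [this]; omega
      show find_max_value_in_str_go (k + 1) xs ((k + 1 : Nat) : Int) = _
      simp only [find_max_value_in_str_go]
      rw [if_neg (by push_cast; omega)]
      have hslice1 : PySem.List.slice xs none (some (-(((k + 1 : Nat) : Int) - 1))) = xs.take (xs.length - k) := by
        rw [show (-(((k + 1 : Nat) : Int) - 1)) = -((k : Nat) : Int) by push_cast; ring]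
        exact PySem.List.slice_to_neg_natCast xs k (by omega)
      rw [hslice1, hfm]
      have hslice2 : PySem.List.slice xs (some ((pn : Int) + 1)) none = xs.drop (pn + 1) := by
        rw [show ((pn : Int) + 1) = ((pn + 1 : Nat) : Int) by push_cast; ring]
        exact PySem.List.slice_from_natCast xs (pn + 1)
      simp only
      rw [hslice2]
      rw [show (((k + 1 : Nat) : Int) - 1) = ((k : Nat) : Int) by push_cast; ring]
      rw [ih (xs.drop (pn + 1)) (by omega) hys]
      rw [show G (k + 1) xs = (xs.take (xs.length - k))[pn] :: G k (xs.drop (pn + 1)) by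
        simp only [G, hfm, Int.toNat_natCast]]
      rw [List.map_cons, join_empty_cons]

-- ===== VERDICT (by name: the statement is the Claim_ definition above) =====
theorem find_max_value_in_str_spec : Claim_equal_find_max_value_in_str := by
  intro arr depth _hdom hpre
  obtain ⟨h1, h2⟩ := hpre
  unfold Spec_find_max_value_in_str
  obtain ⟨k, rfl⟩ : ∃ k : Nat, depth = (k : Int) := ⟨depth.toNat, (Int.toNat_of_nonneg (by omega)).symm⟩
  have hk1 : 1 ≤ k := by exact_mod_cast h1
  have hk2 : k ≤ arr.length := by exact_mod_cast h2
  have hA : find_max_value_in_str arr (k : Int) = PySem.Str.join "" ((G k arr).map PySem.Int.toStr) := by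
    unfold find_max_value_in_str
    rw [Int.toNat_natCast]
    exact A_eq_G k arr hk1 h2
  have hB : find_max_value_in_str_alt arr (k : Int) = PySem.Str.join "" ((G k arr).map PySem.Int.toStr) := by
    simp only [find_max_value_in_str_alt]
    rw [if_neg (by omega), PySem.List.slice_to_natCast, stack_eq_G k arr hk2]
  rw [hA, hB]
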